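-- pv_equiv track=rewrite | github.com/IloveNooodles/Inventory-Game | function.py | CSVParser
-- ===== SOURCE A (Python) =====
-- def CSVParser(lines): #Memparse bentuk CSV ke dalam bentuk list
--     listReturn = []
--     text = ''
--     idx = 1
--
--     for char in lines:
--         if char == ';' or char == '\n':
--             listReturn.append(text)
--             text = ''
--         elif idx == len(lines):
--             text += char
--             listReturn.append(text)
--         else:
--             text += char
--
--         idx += 1
--
--     return listReturn
-- ===== SOURCE B (Python) =====
-- def CSVParser(lines):
--     if not lines:
--         return []
--     fields = lines.replace('\n', ';').split(';')
--     if lines.endswith(';') or lines.endswith('\n'):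
--         fields.pop()
--     return fields
-- ===== Notes on version B (the rewrite author's own statement) =====
-- stated objective: idiomatic
-- what changed: Replaced the char-by-char state machine (manual field accumulator and 1-based last-index test) with one pass that rewrites newlines to semicolons, splits on semicolons, and drops the trailing empty field when the input ends in a separator.
import Mathlib
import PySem

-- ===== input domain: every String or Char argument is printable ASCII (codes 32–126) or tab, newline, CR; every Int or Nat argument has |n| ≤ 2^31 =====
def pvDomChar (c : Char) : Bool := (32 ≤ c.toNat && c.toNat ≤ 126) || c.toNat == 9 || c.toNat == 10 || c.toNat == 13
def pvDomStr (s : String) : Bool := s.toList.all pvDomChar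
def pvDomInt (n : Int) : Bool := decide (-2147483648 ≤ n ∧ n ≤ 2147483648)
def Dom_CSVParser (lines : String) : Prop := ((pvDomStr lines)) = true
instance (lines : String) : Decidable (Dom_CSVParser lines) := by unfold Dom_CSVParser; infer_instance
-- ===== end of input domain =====

-- B replaces A's char-by-char accumulator loop with one replace+split pass plus a trailing-empty pop (idiomatic; return value only).

-- ===== PORT A =====
-- state: listReturn = acc, text, idx; n = len(lines), fixed through the loop
def csvGoA (n : Nat) : List Char → Nat → List String → List Char → List String
  | [], _, acc, _ => acc
  | c :: rest, idx, acc, text =>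
    if c = ';' ∨ c = '\n' then
      csvGoA n rest (idx + 1) (acc ++ [String.ofList text]) []
    else if idx = n then
      csvGoA n rest (idx + 1) (acc ++ [String.ofList (text ++ [c])]) (text ++ [c])
    else
      csvGoA n rest (idx + 1) acc (text ++ [c])

def CSVParser (lines : String) : List String :=
  csvGoA lines.toList.length lines.toList 1 [] []

-- ===== PORT B =====
def CSVParser_alt (lines : String) : List String :=
  if lines = "" then []
  else
    let fields := (PySem.Str.split? (PySem.Str.replace lines "\n" ";") ";").getD []
    if PySem.Str.endswith lines ";" || PySem.Str.endswith lines "\n" then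
      fields.dropLast
    else
      fields

-- ===== PRECONDITION & SPEC =====
def Spec_CSVParser (lines : String) (out : List String) : Prop := out = CSVParser_alt lines
instance (lines : String) (out : List String) : Decidable (Spec_CSVParser lines out) := by unfold Spec_CSVParser; infer_instance

-- ===== CLAIM (what is proved, stated in full; the proofs are below) =====
def Claim_equal_CSVParser : Prop := ∀ (lines : String), Dom_CSVParser lines → Spec_CSVParser lines (CSVParser lines)

-- ===== LEMMAS AND PROOFS =====

/-- '\n' → ';' on a single char. -/
def csvNl (c : Char) : Char := if c = '\n' then ';' else c

/-- forward split on ';' with an explicit current-field accumulator. -/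
def csvSplit : List Char → List Char → List (List Char)
  | [], cur => [cur]
  | c :: rest, cur => if c = ';' then cur :: csvSplit rest [] else csvSplit rest (cur ++ [c])

/-- what A's loop produces past the already-emitted fields. -/
def csvFin : List Char → List Char → List (List Char)
  | [], _ => []
  | c :: rest, text =>
    if c = ';' ∨ c = '\n' then text :: csvFin rest []
    else if rest = [] then [text ++ [c]]
    else csvFin rest (text ++ [c])

lemma csvSplit_ne_nil (l cur : List Char) : csvSplit l cur ≠ [] := by
  induction l generalizing cur with
  | nil => simp [csvSplit]
  | cons c rest ih => by_cases h : c = ';' <;> simp [csvSplit, h, ih]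

lemma replace_go_nl (l : List Char) : ∀ (fuel : Nat) (acc : List Char), l.length ≤ fuel →
    PySem.Chars.replace.go ['\n'] [';'] fuel l acc = acc.reverse ++ l.map csvNl := by
  induction l with
  | nil => intro fuel acc _; cases fuel <;> simp [PySem.Chars.replace.go]
  | cons c t ih =>
    intro fuel acc h
    cases fuel with
    | zero => simp at h
    | succ f =>
      by_cases hc : c = '\n'
      · simp [PySem.Chars.replace.go, List.isPrefixOf, hc, ih f _ (by simpa using h), csvNl]
      · have hne : ¬ ('\n' = c) := fun h3 => hc h3.symm
        simp [PySem.Chars.replace.go, List.isPrefixOf, hne, ih f _ (by simpa using h),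
          csvNl, hc]

lemma replace_nl (l : List Char) : PySem.Chars.replace l ['\n'] [';'] = l.map csvNl := by
  simpa [PySem.Chars.replace] using replace_go_nl l l.length [] le_rfl

lemma splitOn_go_semi (l : List Char) : ∀ (fuel : Nat) (cur : List Char) (acc : List (List Char)),
    l.length < fuel →
    PySem.Chars.splitOn.go [';'] fuel l cur acc = acc.reverse ++ csvSplit l cur.reverse := by
  induction l with
  | nil =>
    intro fuel cur acc h
    cases fuel with
    | zero => simp at h
    | succ f => simp [PySem.Chars.splitOn.go, csvSplit]
  | cons c t ih =>
    intro fuel cur acc h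
    cases fuel with
    | zero => simp at h
    | succ f =>
      by_cases hc : c = ';'
      · simp [PySem.Chars.splitOn.go, List.isPrefixOf, hc, csvSplit,
          ih f [] (cur.reverse :: acc) (by simpa using h)]
      · have hne : ¬ (';' = c) := fun h3 => hc h3.symm
        simp [PySem.Chars.splitOn.go, List.isPrefixOf, hne, hc, csvSplit,
          ih f (c :: cur) acc (by simpa using h)]

lemma splitOn_semi (l : List Char) : PySem.Chars.splitOn l [';'] = csvSplit l [] := by
  simpa [PySem.Chars.splitOn] using
    splitOn_go_semi l (l.length + 1) [] [] (Nat.lt_succ_self _)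

/-- A's loop, started at position idx with cs the remaining suffix. -/
lemma csvGoA_spec (cs : List Char) : ∀ (n idx : Nat) (acc : List String) (text : List Char),
    idx + cs.length = n + 1 →
    csvGoA n cs idx acc text = acc ++ (csvFin cs text).map String.ofList := by
  induction cs with
  | nil => intro n idx acc text _; simp [csvGoA, csvFin]
  | cons c rest ih =>
    intro n idx acc text h
    have hrest : idx + rest.length = n := by simp at h; omega
    by_cases hc : c = ';' ∨ c = '\n'
    · simp [csvGoA, hc, csvFin, ih n (idx + 1) _ [] (by omega)]
    · rcases List.eq_nil_or_concat rest with hr | ⟨ds, d, hr⟩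
      · subst hr
        have hidx : idx = n := by simpa using hrest
        simp [csvGoA, hc, hidx, csvFin]
      · have hne : rest ≠ [] := by simp [hr]
        have hidx : idx ≠ n := by
          intro he; rw [he] at hrest; have : rest.length = 0 := by omega
          exact hne (List.length_eq_zero_iff.mp this)
        simp [csvGoA, hc, hidx, csvFin, hne, ih n (idx + 1) _ (text ++ [c]) (by omega)]

/-- csvFin vs. split-then-maybe-drop. -/
lemma csvFin_eq : ∀ (cs : List Char) (text : List Char) (hcs : cs ≠ []),
    csvFin cs text =
      if csvNl (cs.getLast hcs) = ';' then (csvSplit (cs.map csvNl) text).dropLast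
      else csvSplit (cs.map csvNl) text := by
  intro cs
  induction cs with
  | nil => intro _ h; exact absurd rfl h
  | cons c rest ih =>
    intro text _
    have hsep : (c = ';' ∨ c = '\n') ↔ csvNl c = ';' := by
      constructor
      · rintro (h | h) <;> simp [csvNl, h]
      · intro h; by_cases hc : c = '\n'
        · exact Or.inr hc
        · exact Or.inl (by simpa [csvNl, hc] using h)
    rcases List.eq_nil_or_concat rest with hr | ⟨ds, d, hr⟩
    · subst hr
      by_cases hc : c = ';' ∨ c = '\n'
      · simp [csvFin, hc, csvSplit, hsep.mp hc]
      · have h1 : ¬ csvNl c = ';' := fun h => hc (hsep.mpr h)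
        have hcn : csvNl c = c := by
          unfold csvNl; exact if_neg (fun h => hc (Or.inr h))
        have hc1 : ¬ (c = ';') := fun h => hc (Or.inl h)
        have hc2 : ¬ (c = '\n') := fun h => hc (Or.inr h)
        simp [csvFin, csvSplit, hcn, hc1, hc2]
    · have hne : rest ≠ [] := by simp [hr]
      have hlast : (c :: rest).getLast (by simp) = rest.getLast hne := List.getLast_cons hne
      by_cases hc : c = ';' ∨ c = '\n'
      · have hsemi : csvNl c = ';' := hsep.mp hc
        rw [csvFin]
        simp only [hc, if_pos]
        rw [ih [] hne]
        by_cases hl : csvNl (rest.getLast hne) = ';'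
        · simp [hl, hlast, List.map_cons, csvSplit, hsemi,
            List.dropLast_cons_of_ne_nil (csvSplit_ne_nil _ _)]
        · simp [hl, hlast, List.map_cons, csvSplit, hsemi]
      · have hsemi : ¬ csvNl c = ';' := fun h => hc (hsep.mpr h)
        have hcn : csvNl c = c := by
          unfold csvNl; exact if_neg (fun h => hc (Or.inr h))
        have hc1 : ¬ (c = ';') := fun h => hc (Or.inl h)
        rw [csvFin]
        simp only [hc, if_neg, if_false, hne, ite_false]
        rw [ih (text ++ [c]) hne]
        by_cases hl : csvNl (rest.getLast hne) = ';'
        · simp [hl, hlast, List.map_cons, csvSplit, hcn, hc1]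
        · simp [hl, hlast, List.map_cons, csvSplit, hcn, hc1]

lemma singleton_suffix_iff (x : Char) (ds : List Char) (d : Char) :
    [x] <:+ (ds ++ [d]) ↔ x = d := by
  constructor
  · rintro ⟨pre, h⟩
    have := congrArg List.getLast? h
    simpa [List.getLast?_append] using this
  · rintro rfl; exact ⟨ds, rfl⟩

-- ===== VERDICT (by name: the statement is the Claim_ definition above) =====
theorem CSVParser_spec : Claim_equal_CSVParser := by
  intro lines _
  unfold Spec_CSVParser CSVParser CSVParser_alt
  by_cases hnil : lines = ""
  · subst hnil; simp [csvGoA]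
  · have hcs : lines.toList ≠ [] := fun h => hnil (by
      have := congrArg String.ofList h; simpa using this)
    rw [if_neg hnil]
    have hsplit : PySem.Str.split? (PySem.Str.replace lines "\n" ";") ";" =
        some ((csvSplit (lines.toList.map csvNl) []).map String.ofList) := by
      have hb := PySem.Str.split?_map (PySem.Str.replace lines "\n" ";") ";"
      have hrep : (PySem.Str.replace lines "\n" ";").toList = lines.toList.map csvNl := by
        simpa [replace_nl] using PySem.Str.toList_replace lines "\n" ";"
      rw [hrep] at hb
      have hchars : PySem.Chars.split? (lines.toList.map csvNl) (";".toList) =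
          some (csvSplit (lines.toList.map csvNl) []) := by
        simp [PySem.Chars.split?, splitOn_semi]
      rw [hchars] at hb
      cases hq : PySem.Str.split? (PySem.Str.replace lines "\n" ";") ";" with
      | none => rw [hq] at hb; simp at hb
      | some fs =>
        rw [hq] at hb
        simp only [Option.map_some, Option.some.injEq] at hb
        congr 1
        have h2 := congrArg (List.map String.ofList) hb
        simpa [List.map_map, Function.comp_def] using h2
    rw [hsplit]
    rw [csvGoA_spec lines.toList lines.toList.length 1 [] [] (by omega)]
    rw [csvFin_eq lines.toList [] hcs]
    rcases List.eq_nil_or_concat lines.toList with h | ⟨ds, d, hds⟩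
    · exact absurd h hcs
    · have hlast : lines.toList.getLast hcs = d := by
        simp [hds, List.getLast_concat]
      have hend : (PySem.Str.endswith lines ";" || PySem.Str.endswith lines "\n") = true ↔
          csvNl d = ';' := by
        simp only [Bool.or_eq_true, PySem.Str.endswith_eq, PySem.Chars.endswith_iff]
        constructor
        · rintro (h | h) <;> rw [hds] at h
          · have h3 : ';' = d := by
              simpa using (singleton_suffix_iff ';' ds d).mp (by simpa using h)
            simp [csvNl, ← h3]
          · have h3 : '\n' = d := by
              simpa using (singleton_suffix_iff '\n' ds d).mp (by simpa using h)
            simp [csvNl, ← h3]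
        · intro h
          by_cases hd : d = '\n'
          · right
            show ("\n".toList) <:+ lines.toList
            rw [hds, List.concat_eq_append]
            exact (singleton_suffix_iff '\n' ds d).mpr hd.symm
          · left
            have h3 : d = ';' := by
              by_cases hds' : d = ';'
              · exact hds'
              · exact absurd h (by simp [csvNl, hd, hds'])
            show (";".toList) <:+ lines.toList
            rw [hds, List.concat_eq_append]
            exact (singleton_suffix_iff ';' ds d).mpr h3.symm
      rw [hlast]
      by_cases hsemi : csvNl d = ';'
      · rw [if_pos hsemi, if_pos (hend.mpr hsemi)]
        simp [List.map_dropLast]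
      · rw [if_neg hsemi, if_neg (fun hb => hsemi (hend.mp hb))]
        simp
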